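-- pv_equiv track=rewrite | github.com/praveenreddydaka-ai/etl-automation-project | etl_test_framework/validators/data_quality_validator.py | _dtype_compatible
-- ===== SOURCE A (Python) =====
-- def _dtype_compatible(actual: str, expected: str) -> bool:
--     """Flexible dtype comparison (int32 == int64 etc.)."""
--     numeric_map = {
--         "int": ["int8", "int16", "int32", "int64", "Int8", "Int16", "Int32", "Int64"],
--         "float": ["float16", "float32", "float64"],
--         "str": ["object", "string"],
--         "bool": ["bool", "boolean"],
--     }
--     for group, types in numeric_map.items():
--         if expected in types and actual in types:
--             return True
--     return actual == expected
-- ===== SOURCE B (Python) =====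
-- _TYPE_GROUP = {
--     "int8": "int", "int16": "int", "int32": "int", "int64": "int",
--     "Int8": "int", "Int16": "int", "Int32": "int", "Int64": "int",
--     "float16": "float", "float32": "float", "float64": "float",
--     "object": "str", "string": "str",
--     "bool": "bool", "boolean": "bool",
-- }
--
--
-- def _dtype_compatible(actual: str, expected: str) -> bool:
--     """Flexible dtype comparison (int32 == int64 etc.)."""
--     group = _TYPE_GROUP.get(actual)
--     if group is not None and group == _TYPE_GROUP.get(expected):
--         return True
--     return actual == expected
-- ===== Notes on version B (the rewrite author's own statement) =====
-- stated objective: idiomatic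
-- what changed: Replaced the per-call loop over groups with per-group membership scans by a module-level inverted index mapping each concrete dtype name to its group label, so compatibility is two dict lookups plus the equality fallback.
import Mathlib
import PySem

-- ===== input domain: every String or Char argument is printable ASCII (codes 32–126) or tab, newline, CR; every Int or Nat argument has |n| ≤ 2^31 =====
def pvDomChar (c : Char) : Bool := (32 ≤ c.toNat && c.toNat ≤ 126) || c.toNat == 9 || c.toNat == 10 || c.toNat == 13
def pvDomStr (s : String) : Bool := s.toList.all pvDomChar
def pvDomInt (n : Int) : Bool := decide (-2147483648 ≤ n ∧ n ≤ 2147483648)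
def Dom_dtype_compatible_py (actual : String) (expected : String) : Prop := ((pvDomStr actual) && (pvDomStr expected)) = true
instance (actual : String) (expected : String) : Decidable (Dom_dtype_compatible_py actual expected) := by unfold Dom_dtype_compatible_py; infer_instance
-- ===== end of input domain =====

-- B replaces A's per-call loop over groups (each with a membership scan) by a precomputed
-- inverted index dtype-name → group-label queried twice; idiomatic, same results.

-- ===== PORT A =====
-- A's numeric_map value lists
def pvL0 : List String := ["int8", "int16", "int32", "int64", "Int8", "Int16", "Int32", "Int64"]
def pvL1 : List String := ["float16", "float32", "float64"]
def pvL2 : List String := ["object", "string"]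
def pvL3 : List String := ["bool", "boolean"]

-- A's numeric_map, in insertion order
def pvGroupsA : List (String × List String) :=
  [("int", pvL0), ("float", pvL1), ("str", pvL2), ("bool", pvL3)]

-- the for-loop over numeric_map.items(): first group containing both → True, else fall through
def pvLoopA (actual expected : String) : List (String × List String) → Bool
  | [] => actual == expected
  | (_, types) :: rest =>
      if types.contains expected && types.contains actual then true
      else pvLoopA actual expected rest

def dtype_compatible_py (actual : String) (expected : String) : Bool :=
  pvLoopA actual expected pvGroupsA

-- ===== PORT B =====
-- the module-level inverted index _TYPE_GROUP of Source B
def pvTypeGroup : PySem.Dict String String := PySem.Dict.ofList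
  [("int8", "int"), ("int16", "int"), ("int32", "int"), ("int64", "int"),
   ("Int8", "int"), ("Int16", "int"), ("Int32", "int"), ("Int64", "int"),
   ("float16", "float"), ("float32", "float"), ("float64", "float"),
   ("object", "str"), ("string", "str"),
   ("bool", "bool"), ("boolean", "bool")]

def dtype_compatible_py_alt (actual : String) (expected : String) : Bool :=
  let group := PySem.Dict.get? pvTypeGroup actual
  if group.isSome && group == PySem.Dict.get? pvTypeGroup expected then true
  else actual == expected

-- ===== PRECONDITION & SPEC =====
def Spec_dtype_compatible_py (actual : String) (expected : String) (out : Bool) : Prop := out = dtype_compatible_py_alt actual expected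
instance (actual : String) (expected : String) (out : Bool) : Decidable (Spec_dtype_compatible_py actual expected out) := by unfold Spec_dtype_compatible_py; infer_instance

-- ===== CLAIM (what is proved, stated in full; the proofs are below) =====
def Claim_equal_dtype_compatible_py : Prop := ∀ (actual : String) (expected : String), Dom_dtype_compatible_py actual expected → Spec_dtype_compatible_py actual expected (dtype_compatible_py actual expected)

-- ===== LEMMAS AND PROOFS =====

-- classification of a string by the first of A's four lists containing it (4 = none of them)
def pvCls (s : String) : Nat :=
  if pvL0.contains s then 0
  else if pvL1.contains s then 1
  else if pvL2.contains s then 2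
  else if pvL3.contains s then 3
  else 4

lemma pvCls0 (s : String) (h : s ∈ pvL0) : pvCls s = 0 := by
  simp [pvCls, h]

lemma pvCls1 (s : String) (h0 : ¬ s ∈ pvL0) (h : s ∈ pvL1) :
    pvCls s = 1 := by simp [pvCls, h0, h]

lemma pvCls2 (s : String) (h0 : ¬ s ∈ pvL0) (h1 : ¬ s ∈ pvL1)
    (h : s ∈ pvL2) : pvCls s = 2 := by simp [pvCls, h0, h1, h]

lemma pvCls3 (s : String) (h0 : ¬ s ∈ pvL0) (h1 : ¬ s ∈ pvL1)
    (h2 : ¬ s ∈ pvL2) (h : s ∈ pvL3) : pvCls s = 3 := by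
  simp [pvCls, h0, h1, h2, h]

lemma pvCls4 (s : String) (h0 : ¬ s ∈ pvL0) (h1 : ¬ s ∈ pvL1)
    (h2 : ¬ s ∈ pvL2) (h3 : ¬ s ∈ pvL3) : pvCls s = 4 := by
  simp [pvCls, h0, h1, h2, h3]

lemma pvC0 (s : String) : pvL0.contains s = decide (pvCls s = 0) := by
  by_cases h0 : s ∈ pvL0
  · simp [h0, pvCls0 s h0]
  · by_cases h1 : s ∈ pvL1
    · simp [h0, pvCls1 s h0 h1]
    · by_cases h2 : s ∈ pvL2
      · simp [h0, pvCls2 s h0 h1 h2]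
      · by_cases h3 : s ∈ pvL3
        · simp [h0, pvCls3 s h0 h1 h2 h3]
        · simp [h0, pvCls4 s h0 h1 h2 h3]

lemma pvC1 (s : String) : pvL1.contains s = decide (pvCls s = 1) := by
  by_cases h0 : s ∈ pvL0
  · rw [pvCls0 s h0]
    simp [pvL0] at h0
    rcases h0 with rfl | rfl | rfl | rfl | rfl | rfl | rfl | rfl <;> decide
  · by_cases h1 : s ∈ pvL1
    · simp [h1, pvCls1 s h0 h1]
    · by_cases h2 : s ∈ pvL2
      · simp [h1, pvCls2 s h0 h1 h2]
      · by_cases h3 : s ∈ pvL3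
        · simp [h1, pvCls3 s h0 h1 h2 h3]
        · simp [h1, pvCls4 s h0 h1 h2 h3]

lemma pvC2 (s : String) : pvL2.contains s = decide (pvCls s = 2) := by
  by_cases h0 : s ∈ pvL0
  · rw [pvCls0 s h0]
    simp [pvL0] at h0
    rcases h0 with rfl | rfl | rfl | rfl | rfl | rfl | rfl | rfl <;> decide
  · by_cases h1 : s ∈ pvL1
    · rw [pvCls1 s h0 h1]
      simp [pvL1] at h1
      rcases h1 with rfl | rfl | rfl <;> decide
    · by_cases h2 : s ∈ pvL2
      · simp [h2, pvCls2 s h0 h1 h2]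
      · by_cases h3 : s ∈ pvL3
        · simp [h2, pvCls3 s h0 h1 h2 h3]
        · simp [h2, pvCls4 s h0 h1 h2 h3]

lemma pvC3 (s : String) : pvL3.contains s = decide (pvCls s = 3) := by
  by_cases h0 : s ∈ pvL0
  · rw [pvCls0 s h0]
    simp [pvL0] at h0
    rcases h0 with rfl | rfl | rfl | rfl | rfl | rfl | rfl | rfl <;> decide
  · by_cases h1 : s ∈ pvL1
    · rw [pvCls1 s h0 h1]
      simp [pvL1] at h1
      rcases h1 with rfl | rfl | rfl <;> decide
    · by_cases h2 : s ∈ pvL2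
      · rw [pvCls2 s h0 h1 h2]
        simp [pvL2] at h2
        rcases h2 with rfl | rfl <;> decide
      · by_cases h3 : s ∈ pvL3
        · simp [h3, pvCls3 s h0 h1 h2 h3]
        · simp [h3, pvCls4 s h0 h1 h2 h3]

-- the inverted index looks a string up to exactly the label of its pvCls class
lemma pvGet (s : String) : PySem.Dict.get? pvTypeGroup s =
    (if pvCls s = 0 then some "int" else if pvCls s = 1 then some "float"
     else if pvCls s = 2 then some "str" else if pvCls s = 3 then some "bool" else none) := by
  by_cases h0 : s ∈ pvL0
  · rw [pvCls0 s h0]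
    simp [pvL0] at h0
    rcases h0 with rfl | rfl | rfl | rfl | rfl | rfl | rfl | rfl <;> decide
  · by_cases h1 : s ∈ pvL1
    · rw [pvCls1 s h0 h1]
      norm_num
      simp [pvL1] at h1
      rcases h1 with rfl | rfl | rfl <;> decide
    · by_cases h2 : s ∈ pvL2
      · rw [pvCls2 s h0 h1 h2]
        norm_num
        simp [pvL2] at h2
        rcases h2 with rfl | rfl <;> decide
      · by_cases h3 : s ∈ pvL3
        · rw [pvCls3 s h0 h1 h2 h3]
          norm_num
          simp [pvL3] at h3
          rcases h3 with rfl | rfl <;> decide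
        · rw [pvCls4 s h0 h1 h2 h3]
          norm_num
          simp only [pvL0, pvL1, pvL2, pvL3, List.mem_cons,
            List.not_mem_nil, or_false, not_or] at h0 h1 h2 h3
          obtain ⟨n1, n2, n3, n4, n5, n6, n7, n8⟩ := h0
          obtain ⟨m1, m2, m3⟩ := h1
          obtain ⟨o1, o2⟩ := h2
          obtain ⟨b1, b2⟩ := h3
          have e : pvTypeGroup = PySem.Dict.mk
            [("int8", "int"), ("int16", "int"), ("int32", "int"), ("int64", "int"),
             ("Int8", "int"), ("Int16", "int"), ("Int32", "int"), ("Int64", "int"),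
             ("float16", "float"), ("float32", "float"), ("float64", "float"),
             ("object", "str"), ("string", "str"),
             ("bool", "bool"), ("boolean", "bool")] := by decide
          rw [e]
          simp [PySem.Dict.get?, beq_iff_eq, Ne.symm n1, Ne.symm n2, Ne.symm n3, Ne.symm n4,
            Ne.symm n5, Ne.symm n6, Ne.symm n7, Ne.symm n8, Ne.symm m1, Ne.symm m2, Ne.symm m3,
            Ne.symm o1, Ne.symm o2, Ne.symm b1, Ne.symm b2]

lemma pvMain (a e : String) : dtype_compatible_py a e = dtype_compatible_py_alt a e := by
  simp only [dtype_compatible_py, dtype_compatible_py_alt, pvGroupsA, pvLoopA,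
    pvC0, pvC1, pvC2, pvC3, pvGet]
  generalize pvCls a = x
  generalize pvCls e = y
  by_cases hx0 : x = 0 <;> by_cases hx1 : x = 1 <;> by_cases hx2 : x = 2 <;> by_cases hx3 : x = 3 <;>
    by_cases hy0 : y = 0 <;> by_cases hy1 : y = 1 <;> by_cases hy2 : y = 2 <;> by_cases hy3 : y = 3 <;>
    simp_all

-- ===== VERDICT (by name: the statement is the Claim_ definition above) =====
theorem dtype_compatible_py_spec : Claim_equal_dtype_compatible_py := by
  intro a e _
  unfold Spec_dtype_compatible_py
  exact pvMain a e
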